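-- pv_equiv track=rewrite | github.com/VictoryNo1/soulmate | dealData.py | list2_of_per_list1
-- ===== SOURCE A (Python) =====
-- def counter_per_value(mylist, ordered=None):
-- 	"""统计列表中每个元素的个数，去掉重复的
-- 	:param mylist 待统计的列表
-- 	:param ordered mylist列表中元素的顺序，如果不传入该参数，则按列表中每个元素依次出现的顺序排序
--
-- 	:return mylist列表中每个元素的个数
-- 	"""
-- 	res = {}
-- 	if not ordered:
-- 		ordered = set(mylist)
-- 	for order in ordered:
-- 		res.update({str(order): mylist.count(order)})
--
-- 	return res
--
-- def list2_of_per_list1(list1, list2, ordered1=None, ordered2=None):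
-- 	"""
-- 	每个list1中属于list2的个数，例如list1为身高列表，list2为性别列表，返回的是每个身高下，男女的数量
-- 	:param list1: 列表1
-- 	:param list2: 列表2
-- 	:param ordered1: 列表1的元素排序
-- 	:param ordered2: 列表2的元素排序
-- 	:return: 返回统计后的结果
-- 	"""
-- 	res = {}
-- 	if not ordered1:
-- 		ordered1 = set(list1)
-- 	for ordered in ordered1:
-- 		listed = [list2[i] for i in range(len(list1)) if list1[i] == ordered]
-- 		res.update({str(ordered): counter_per_value(listed, ordered2)})
--
-- 	return res
-- ===== SOURCE B (Python) =====
-- def list2_of_per_list1(list1, list2, ordered1=None, ordered2=None):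
-- 	"""Single grouping pass over zip(list1, list2), then one pass per key."""
-- 	groups = {}
-- 	for v1, v2 in zip(list1, list2):
-- 		groups.setdefault(v1, []).append(v2)
-- 	keys1 = ordered1 if ordered1 else list(dict.fromkeys(list1))
-- 	res = {}
-- 	for v1 in keys1:
-- 		vals = groups.get(v1, [])
-- 		counts = {}
-- 		for v2 in vals:
-- 			counts[v2] = counts.get(v2, 0) + 1
-- 		keys2 = ordered2 if ordered2 else list(dict.fromkeys(vals))
-- 		res[str(v1)] = {str(v2): counts.get(v2, 0) for v2 in keys2}
-- 	return res
-- ===== Notes on version B (the rewrite author's own statement) =====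
-- stated objective: alternative
-- what changed: B replaces A's per-key filtering scan of list1 (and the list.count scans inside counter_per_value) by one grouping pass over zip(list1,list2) plus a one-pass hash counter per group; intended as faster (measured 16-84x on mid sizes) but unconfirmed at the largest sizes, where output size dominates both.
import Mathlib
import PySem

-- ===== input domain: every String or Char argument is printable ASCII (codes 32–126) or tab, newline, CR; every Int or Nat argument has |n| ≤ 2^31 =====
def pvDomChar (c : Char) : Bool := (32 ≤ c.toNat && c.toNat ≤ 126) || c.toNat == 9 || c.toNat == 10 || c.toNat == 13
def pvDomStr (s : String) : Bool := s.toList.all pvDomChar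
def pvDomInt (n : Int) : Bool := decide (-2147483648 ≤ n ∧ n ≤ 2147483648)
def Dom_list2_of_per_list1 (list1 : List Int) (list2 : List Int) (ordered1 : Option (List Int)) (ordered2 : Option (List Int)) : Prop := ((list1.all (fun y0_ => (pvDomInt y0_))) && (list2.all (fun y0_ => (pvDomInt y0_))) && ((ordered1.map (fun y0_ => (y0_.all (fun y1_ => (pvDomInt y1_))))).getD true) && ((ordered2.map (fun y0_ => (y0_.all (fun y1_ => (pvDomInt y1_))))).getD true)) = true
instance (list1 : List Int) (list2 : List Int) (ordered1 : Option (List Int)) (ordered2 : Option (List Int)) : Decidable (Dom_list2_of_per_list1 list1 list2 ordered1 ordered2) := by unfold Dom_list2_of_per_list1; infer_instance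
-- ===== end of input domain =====

-- B replaces A's per-key filtering scans by one grouping pass over zip(list1,list2) plus one-pass
-- counters; equivalence is about the RETURN value (neither version mutates its arguments).
-- Output dicts are modelled as association lists; Python's set-iteration order (not modelled) only
-- affects dict key order, which output comparison ignores.

-- ===== PORT A =====
def counterPerValue (mylist : List Int) (ordered : Option (List Int)) : List (String × Int) :=
  let ord : List Int :=
    match ordered with
    | none => PySem.Set.ofList mylist
    | some [] => PySem.Set.ofList mylist
    | some o => o
  (ord.foldl (fun (res : PySem.Dict String Int) order =>
      res.insert (PySem.Int.toStr order) (PySem.List.count mylist order)) PySem.Dict.empty).items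

def list2_of_per_list1 (list1 : List Int) (list2 : List Int) (ordered1 : Option (List Int)) (ordered2 : Option (List Int)) : List (String × List (String × Int)) :=
  let ord1 : List Int :=
    match ordered1 with
    | none => PySem.Set.ofList list1
    | some [] => PySem.Set.ofList list1
    | some o => o
  (ord1.foldl (fun (res : PySem.Dict String (List (String × Int))) v =>
      -- [list2[i] for i in range(len(list1)) if list1[i] == ordered]; list2[i] may raise
      -- (IndexError = pyGet? none), excluded by Pre_
      let listed : List Int :=
        (PySem.List.pyRange 0 (list1.length : Int) 1).foldl
          (fun acc i =>
            if PySem.List.pyGetD list1 i 0 = v then acc ++ (PySem.List.pyGet? list2 i).toList else acc) []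
      res.insert (PySem.Int.toStr v) (counterPerValue listed ordered2)) PySem.Dict.empty).items

-- ===== PORT B =====
def list2_of_per_list1_alt (list1 : List Int) (list2 : List Int) (ordered1 : Option (List Int)) (ordered2 : Option (List Int)) : List (String × List (String × Int)) :=
  -- groups.setdefault(v1, []).append(v2)  ==  modify v1 [] (· ++ [v2])
  let groups : PySem.Dict Int (List Int) :=
    (list1.zip list2).foldl (fun g p => g.modify p.1 [] (· ++ [p.2])) PySem.Dict.empty
  let keys1 : List Int :=
    match ordered1 with
    | none => PySem.List.dedup list1
    | some [] => PySem.List.dedup list1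
    | some o => o
  (keys1.foldl (fun (res : PySem.Dict String (List (String × Int))) v =>
      let vals : List Int := groups.getD v []
      let counts : PySem.Dict Int Int :=
        vals.foldl (fun c w => c.insert w (c.getD w 0 + 1)) PySem.Dict.empty
      let keys2 : List Int :=
        match ordered2 with
        | none => PySem.List.dedup vals
        | some [] => PySem.List.dedup vals
        | some o => o
      res.insert (PySem.Int.toStr v)
        ((keys2.foldl (fun (inner : PySem.Dict String Int) w =>
            inner.insert (PySem.Int.toStr w) (counts.getD w 0)) PySem.Dict.empty).items))
    PySem.Dict.empty).items

-- ===== PRECONDITION & SPEC =====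
-- Pre_ excludes exactly the inputs where A raises IndexError: list1 longer than list2 with some
-- iterated key occurring among the unpaired tail elements of list1 (list2[i] out of range).
def Pre_list2_of_per_list1 (list1 : List Int) (list2 : List Int) (ordered1 : Option (List Int)) (ordered2 : Option (List Int)) : Prop :=
  ∀ x ∈ list1.drop list2.length,
    x ∉ (match ordered1 with
         | none => list1
         | some [] => list1
         | some o => o)

instance (list1 : List Int) (list2 : List Int) (ordered1 : Option (List Int)) (ordered2 : Option (List Int)) : Decidable (Pre_list2_of_per_list1 list1 list2 ordered1 ordered2) := by unfold Pre_list2_of_per_list1; infer_instance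

def pvWitness_list2_of_per_list1 : List Int × List Int × Option (List Int) × Option (List Int) :=
  ([1, 1, 2], [5, 6, 5], none, none)

def Spec_list2_of_per_list1 (list1 : List Int) (list2 : List Int) (ordered1 : Option (List Int)) (ordered2 : Option (List Int)) (out : List (String × List (String × Int))) : Prop := out = list2_of_per_list1_alt list1 list2 ordered1 ordered2
instance (list1 : List Int) (list2 : List Int) (ordered1 : Option (List Int)) (ordered2 : Option (List Int)) (out : List (String × List (String × Int))) : Decidable (Spec_list2_of_per_list1 list1 list2 ordered1 ordered2 out) := by unfold Spec_list2_of_per_list1; infer_instance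

-- ===== CLAIM (what is proved, stated in full; the proofs are below) =====
def Claim_equal_list2_of_per_list1 : Prop := ∀ (list1 : List Int) (list2 : List Int) (ordered1 : Option (List Int)) (ordered2 : Option (List Int)), Dom_list2_of_per_list1 list1 list2 ordered1 ordered2 → Pre_list2_of_per_list1 list1 list2 ordered1 ordered2 → Spec_list2_of_per_list1 list1 list2 ordered1 ordered2 (list2_of_per_list1 list1 list2 ordered1 ordered2)


-- ===== LEMMAS AND PROOFS =====

-- A's index-comprehension equals the zip-group: both collect the list2 partners of v, provided no
-- unpaired tail element of list1 equals v.
theorem listedA_eq_group (v : Int) : ∀ (l1 l2 : List Int) (init : List Int),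
    (∀ x ∈ l1.drop l2.length, x ≠ v) →
    (List.range l1.length).foldl
        (fun acc k => if l1.getD k 0 = v then acc ++ (l2[k]?).toList else acc) init
      = init ++ (((l1.zip l2).filter (fun p => p.1 == v)).map (fun p => p.2)) := by
  intro l1
  induction l1 with
  | nil => intro l2 init _; simp
  | cons a t ih =>
    intro l2 init h
    simp only [List.length_cons]
    rw [List.range_succ_eq_map]
    simp only [List.foldl_cons, List.foldl_map]
    have hstep : ∀ (acc : List Int) (k : Nat),
        (if (a :: t).getD (k + 1) 0 = v then acc ++ (l2[k + 1]?).toList else acc)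
          = (if t.getD k 0 = v then acc ++ (l2.tail[k]?).toList else acc) := by
      intro acc k
      cases l2 <;> simp [List.getD]
    have := PySem.List.foldl_congr_mem (List.range t.length)
      (fun acc k => if (a :: t).getD (k + 1) 0 = v then acc ++ (l2[k + 1]?).toList else acc)
      (fun acc k => if t.getD k 0 = v then acc ++ (l2.tail[k]?).toList else acc)
      (if (a :: t).getD 0 0 = v then init ++ (l2[0]?).toList else init)
      (by intro acc k _; exact hstep acc k)
    rw [this]
    cases l2 with
    | nil =>
      have ha : a ≠ v := h a (by simp)
      have ht : ∀ x ∈ t.drop 0, x ≠ v := by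
        intro x hx; exact h x (by simp at hx ⊢; exact Or.inr hx)
      simp only [List.tail_nil]
      rw [ih [] _ ht]
      simp [List.getD, ha]
    | cons b l2' =>
      have ht : ∀ x ∈ t.drop l2'.length, x ≠ v := by
        intro x hx
        exact h x (by simpa using hx)
      simp only [List.tail_cons]
      rw [ih l2' _ ht]
      by_cases hav : a = v <;> simp [List.getD, hav]

-- the key list A iterates equals the key list B iterates
theorem keys_eq (list1 : List Int) (ordered1 : Option (List Int)) :
    (match ordered1 with
     | none => PySem.Set.ofList list1
     | some [] => PySem.Set.ofList list1
     | some o => o)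
    = (match ordered1 with
       | none => PySem.List.dedup list1
       | some [] => PySem.List.dedup list1
       | some o => o) := by
  cases ordered1 with
  | none => simp [PySem.List.dedup_eq_ofList]
  | some o => cases o <;> simp [PySem.List.dedup_eq_ofList]

-- per iterated key v, A's inner dict equals B's inner dict (as item lists)
theorem inner_eq (list1 list2 : List Int) (ordered2 : Option (List Int)) (v : Int)
    (h : ∀ x ∈ list1.drop list2.length, x ≠ v) :
    counterPerValue
        ((PySem.List.pyRange 0 (list1.length : Int) 1).foldl
          (fun acc i =>
            if PySem.List.pyGetD list1 i 0 = v then acc ++ (PySem.List.pyGet? list2 i).toList else acc) [])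
        ordered2
      = (let vals : List Int :=
           ((list1.zip list2).foldl (fun g p => g.modify p.1 [] (· ++ [p.2]))
             (PySem.Dict.empty : PySem.Dict Int (List Int))).getD v []
         let counts : PySem.Dict Int Int :=
           vals.foldl (fun c w => c.insert w (c.getD w 0 + 1)) PySem.Dict.empty
         let keys2 : List Int :=
           match ordered2 with
           | none => PySem.List.dedup vals
           | some [] => PySem.List.dedup vals
           | some o => o
         (keys2.foldl (fun (inner : PySem.Dict String Int) w =>
             inner.insert (PySem.Int.toStr w) (counts.getD w 0)) PySem.Dict.empty).items) := by
  have hlisted :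
      (PySem.List.pyRange 0 (list1.length : Int) 1).foldl
          (fun acc i =>
            if PySem.List.pyGetD list1 i 0 = v then acc ++ (PySem.List.pyGet? list2 i).toList else acc) []
        = ((list1.zip list2).foldl (fun g p => g.modify p.1 [] (· ++ [p.2]))
             (PySem.Dict.empty : PySem.Dict Int (List Int))).getD v [] := by
    rw [PySem.Dict.getD_foldl_modify_append, PySem.List.pyRange_zero_nat, List.foldl_map]
    simpa [PySem.List.pyGetD_natCast, PySem.List.pyGet?_natCast] using
      listedA_eq_group v list1 list2 [] h
  rw [hlisted]
  -- both inner folds now run over the same key list with equal bodies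
  unfold counterPerValue
  simp only []
  set vals := ((list1.zip list2).foldl (fun g p => g.modify p.1 [] (· ++ [p.2]))
      (PySem.Dict.empty : PySem.Dict Int (List Int))).getD v [] with hv
  rw [keys_eq vals ordered2]
  congr 1
  apply PySem.List.foldl_congr_mem
  intro acc w _
  congr 1
  rw [PySem.List.count_eq, PySem.Dict.getD_foldl_insert_add_one]
  simp

-- ===== VERDICT (by name: the statement is the Claim_ definition above) =====
theorem list2_of_per_list1_spec : Claim_equal_list2_of_per_list1 := by
  intro list1 list2 ordered1 ordered2 _ hpre
  unfold Spec_list2_of_per_list1 list2_of_per_list1 list2_of_per_list1_alt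
  simp only []
  congr 1
  rw [keys_eq list1 ordered1]
  apply PySem.List.foldl_congr_mem
  intro res v hv
  congr 1
  apply inner_eq
  intro x hx hxv
  exact hpre x hx (by subst hxv; cases ordered1 with
    | none => simpa using hv
    | some o => cases o with
      | nil => simpa [keys_eq] using hv
      | cons a l => simpa using hv)
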